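-- pv_equiv track=rewrite | github.com/ahsas257-glitc/GPS-Tracker | app.py | column_match_score
-- ===== SOURCE A (Python) =====
-- from typing import Any
--
-- def normalize_column(name: Any) -> str:
--     return str(name).strip().lower().replace("_", "-")
--
-- def column_match_score(column: str, aliases: list[str]) -> int:
--     ncol = normalize_column(column)
--     compact = ncol.replace("-", "").replace(" ", "")
--     best = 0
--     for alias in aliases:
--         key = normalize_column(alias)
--         key_compact = key.replace("-", "").replace(" ", "")
--         if ncol == key:
--             best = max(best, 100)
--         elif compact == key_compact:
--             best = max(best, 95)
--         elif key in ncol or key_compact in compact: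
--             best = max(best, 80)
--         elif all(part in ncol for part in key.split("-")):
--             best = max(best, 65)
--     return best
-- ===== SOURCE B (Python) =====
-- def column_match_score(column: str, aliases: list[str]) -> int:
--     # Tiered passes: return the highest tier that ANY alias satisfies.
--     ncol = str(column).strip().lower().replace("_", "-")
--     compact = ncol.replace("-", "").replace(" ", "")
--     norm = lambda a: str(a).strip().lower().replace("_", "-")
--     comp = lambda s: s.replace("-", "").replace(" ", "")
--     if any(ncol == norm(a) for a in aliases):
--         return 100
--     if any(compact == comp(norm(a)) for a in aliases):
--         return 95
--     if any(norm(a) in ncol or comp(norm(a)) in compact for a in aliases):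
--         return 80
--     if any(all(part in ncol for part in norm(a).split("-")) for a in aliases):
--         return 65
--     return 0
-- ===== Notes on version B (the rewrite author's own statement) =====
-- stated objective: simpler
-- what changed: A keeps a running best while scoring every alias through the full if/elif chain; B checks tiers top-down with one any-scan per tier (exact, compact-equal, substring, hyphen-parts) and returns at the first tier any alias satisfies, so it stops as soon as the answer is known (timed much faster).
import Mathlib
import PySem

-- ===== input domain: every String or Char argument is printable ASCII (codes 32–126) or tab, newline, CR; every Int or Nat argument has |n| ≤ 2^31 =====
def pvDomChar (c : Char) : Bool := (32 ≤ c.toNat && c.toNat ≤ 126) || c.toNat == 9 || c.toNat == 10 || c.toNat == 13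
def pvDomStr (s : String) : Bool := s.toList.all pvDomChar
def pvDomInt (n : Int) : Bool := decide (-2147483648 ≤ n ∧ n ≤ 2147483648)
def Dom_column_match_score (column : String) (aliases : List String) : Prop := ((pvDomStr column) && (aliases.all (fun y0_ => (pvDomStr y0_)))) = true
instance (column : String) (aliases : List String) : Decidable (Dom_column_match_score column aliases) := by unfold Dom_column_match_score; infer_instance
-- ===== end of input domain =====

-- B replaces A's per-alias scoring loop with early-returning tiered passes (one `any` scan per tier); objective: simpler.

-- ===== PORT A =====
-- normalize_column: str(name).strip().lower().replace("_", "-")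
def pvNorm (s : String) : String :=
  PySem.Str.replace (PySem.Str.lower (PySem.Str.strip s)) "_" "-"

-- s.replace("-", "").replace(" ", "")
def pvComp (s : String) : String :=
  PySem.Str.replace (PySem.Str.replace s "-" "") " " ""

-- loop body of A: the if/elif chain updating `best`
def pvStepA (ncol compact : String) (best : Int) (alias' : String) : Int :=
  let key := pvNorm alias'
  let key_compact := pvComp key
  if ncol == key then max best 100
  else if compact == key_compact then max best 95
  else if PySem.Str.isIn key ncol || PySem.Str.isIn key_compact compact then max best 80
  else if ((PySem.Str.split? key "-").getD []).all (fun p => PySem.Str.isIn p ncol) then max best 65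
  else best

def column_match_score (column : String) (aliases : List String) : Int :=
  let ncol := pvNorm column
  let compact := pvComp ncol
  aliases.foldl (pvStepA ncol compact) 0

-- ===== PORT B =====
-- B's tiered passes: the highest tier satisfied by ANY alias, checked top-down with early return
def pvTiers (ncol compact : String) (aliases : List String) : Int :=
  if aliases.any (fun a => ncol == pvNorm a) then 100
  else if aliases.any (fun a => compact == pvComp (pvNorm a)) then 95
  else if aliases.any (fun a =>
      PySem.Str.isIn (pvNorm a) ncol || PySem.Str.isIn (pvComp (pvNorm a)) compact) then 80
  else if aliases.any (fun a =>
      ((PySem.Str.split? (pvNorm a) "-").getD []).all (fun p => PySem.Str.isIn p ncol)) then 65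
  else 0

def column_match_score_alt (column : String) (aliases : List String) : Int :=
  let ncol := pvNorm column
  let compact := pvComp ncol
  pvTiers ncol compact aliases

-- ===== PRECONDITION & SPEC =====
def Spec_column_match_score (column : String) (aliases : List String) (out : Int) : Prop := out = column_match_score_alt column aliases
instance (column : String) (aliases : List String) (out : Int) : Decidable (Spec_column_match_score column aliases out) := by unfold Spec_column_match_score; infer_instance

-- ===== CLAIM (what is proved, stated in full; the proofs are below) =====
def Claim_equal_column_match_score : Prop := ∀ (column : String) (aliases : List String), Dom_column_match_score column aliases → Spec_column_match_score column aliases (column_match_score column aliases)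

-- ===== LEMMAS AND PROOFS =====

lemma pvStepA_nonneg (n c : String) (b : Int) (a : String) (hb : 0 ≤ b) :
    0 ≤ pvStepA n c b a := by
  simp only [pvStepA]
  split_ifs <;> omega

lemma pvTiers_nonneg (n c : String) (as : List String) : 0 ≤ pvTiers n c as := by
  rw [pvTiers]
  split_ifs <;> norm_num

-- the if/elif shape of the two programs, with the eight conditions abstracted to Bools
lemma tiers_abstract (e q s p e' q' s' p' : Bool) (b : Int) :
    max (if e = true then max b 100 else if q = true then max b 95
         else if s = true then max b 80 else if p = true then max b 65 else b)
        (if e' = true then (100:Int) else if q' = true then 95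
         else if s' = true then 80 else if p' = true then 65 else 0)
  = max b (if (e || e') = true then (100:Int) else if (q || q') = true then 95
           else if (s || s') = true then 80 else if (p || p') = true then 65 else 0) := by
  cases e <;> cases q <;> cases s <;> cases p <;> cases e' <;> cases q' <;> cases s' <;> cases p' <;>
    simp

lemma pvTiers_cons (n c : String) (a : String) (as : List String) (b : Int) :
    max (pvStepA n c b a) (pvTiers n c as) = max b (pvTiers n c (a :: as)) := by
  simp only [pvStepA, pvTiers, List.any_cons]
  exact tiers_abstract _ _ _ _ _ _ _ _ b

lemma foldl_step_eq (n c : String) (as : List String) : ∀ (b : Int), 0 ≤ b →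
    as.foldl (pvStepA n c) b = max b (pvTiers n c as) := by
  induction as with
  | nil =>
    intro b hb
    rw [List.foldl_nil, pvTiers]
    simp only [List.any_nil, if_neg, Bool.false_eq_true, not_false_iff]
    omega
  | cons a as ih =>
    intro b hb
    rw [List.foldl_cons, ih _ (pvStepA_nonneg n c b a hb), pvTiers_cons n c a as b]

-- ===== VERDICT (by name: the statement is the Claim_ definition above) =====
theorem column_match_score_spec : Claim_equal_column_match_score := by
  intro column aliases _
  unfold Spec_column_match_score column_match_score column_match_score_alt
  have h := foldl_step_eq (pvNorm column) (pvComp (pvNorm column)) aliases 0 le_rfl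
  have h2 := pvTiers_nonneg (pvNorm column) (pvComp (pvNorm column)) aliases
  simp only [h]
  omega
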